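-- pv_equiv track=rewrite | github.com/ip-oss/GuardianAI | gridworld_fingerprint/utils/observer_placement.py | find_unobserved_corridors
-- ===== SOURCE A (Python) =====
-- from typing import List, Tuple, Set, Dict, Any
-- from collections import deque
--
-- def compute_coverage(
--     observers: List[Tuple[int, int]],
--     grid_size: int,
--     radius: int
-- ) -> Set[Tuple[int, int]]:
--     """
--     Compute all cells covered by observers using Manhattan distance.
--
--     Args:
--         observers: List of (x, y) observer positions
--         grid_size: Size of the grid (N for NxN)
--         radius: Detection radius (Manhattan distance)
--
--     Returns:
--         Set of (x, y) tuples representing covered cells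
--
--     Example:
--         >>> observers = [(5, 5)]
--         >>> covered = compute_coverage(observers, 10, radius=1)
--         >>> len(covered)  # Should be ~5 cells (center + 4 adjacent)
--         5
--     """
--     covered = set()
--
--     for (ox, oy) in observers:
--         # Iterate over bounding box, filter by Manhattan distance
--         for x in range(max(0, ox - radius), min(grid_size, ox + radius + 1)):
--             for y in range(max(0, oy - radius), min(grid_size, oy + radius + 1)):
--                 # Manhattan distance check
--                 if abs(x - ox) + abs(y - oy) <= radius:
--                     covered.add((x, y))
--
--     return covered
--
-- def find_unobserved_corridors(
--     observers: List[Tuple[int, int]],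
--     grid_size: int,
--     radius: int
-- ) -> List[Set[Tuple[int, int]]]:
--     """
--     Find connected components of unobserved cells (corridors).
--
--     Uses BFS to identify distinct unobserved regions. Large corridors
--     allow deceptive agents to plan extended misaligned routes.
--
--     Args:
--         observers: List of (x, y) observer positions
--         grid_size: Size of the grid
--         radius: Detection radius
--
--     Returns:
--         List of sets, each set contains cells in one corridor
--
--     Example:
--         >>> corridors = find_unobserved_corridors([(5,5)], 10, 1)
--         >>> len(corridors)  # Multiple disconnected unobserved regions
--         4
--     """
--     covered = compute_coverage(observers, grid_size, radius)
--     uncovered = {(x, y) for x in range(grid_size)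
--                  for y in range(grid_size)} - covered
--
--     # BFS to find connected components
--     corridors = []
--     visited = set()
--
--     for start_cell in uncovered:
--         if start_cell in visited:
--             continue
--
--         # BFS from start_cell
--         corridor = set()
--         queue = deque([start_cell])
--
--         while queue:
--             cell = queue.popleft()
--             if cell in visited:
--                 continue
--
--             visited.add(cell)
--             corridor.add(cell)
--
--             # Add 4-connected neighbors (up, right, down, left)
--             x, y = cell
--             for dx, dy in [(-1, 0), (1, 0), (0, -1), (0, 1)]:
--                 neighbor = (x + dx, y + dy)
--                 if (neighbor in uncovered and
--                     neighbor not in visited):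
--                     queue.append(neighbor)
--
--         corridors.append(corridor)
--
--     return corridors
-- ===== SOURCE B (Python) =====
-- def find_unobserved_corridors(observers, grid_size, radius):
--     # Direct per-cell observer test instead of per-observer stamping, and corridors
--     # grown by level-synchronous frontier expansion against a shrinking pool of
--     # unassigned cells (no deque, no global visited set).
--     covered = {(x, y) for x in range(grid_size) for y in range(grid_size)
--                if any(abs(x - ox) + abs(y - oy) <= radius for ox, oy in observers)}
--     uncovered = {(x, y) for x in range(grid_size)
--                  for y in range(grid_size)} - covered
--
--     pool = set(uncovered)          # cells not yet assigned to a corridor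
--     corridors = []
--     for start in uncovered:
--         if start not in pool:
--             continue
--         comp = {start}
--         frontier = [start]
--         while frontier:
--             nxt = []
--             for x, y in frontier:
--                 for nb in ((x - 1, y), (x + 1, y), (x, y - 1), (x, y + 1)):
--                     if nb in pool and nb not in comp:
--                         comp.add(nb)
--                         nxt.append(nb)
--             frontier = nxt
--         pool -= comp
--         corridors.append(comp)
--     return corridors
-- ===== Notes on version B (the rewrite author's own statement) =====
-- stated objective: alternative
-- what changed: B computes the uncovered region by testing each grid cell directly against all observers (any-distance test) instead of stamping per-observer bounding boxes, and grows each corridor by level-synchronous frontier expansion against a shrinking pool of still-unassigned cells (per-corridor set used for dedup, pool shrunk by set difference) instead of A's deque BFS with a global visited set.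
import Mathlib
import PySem

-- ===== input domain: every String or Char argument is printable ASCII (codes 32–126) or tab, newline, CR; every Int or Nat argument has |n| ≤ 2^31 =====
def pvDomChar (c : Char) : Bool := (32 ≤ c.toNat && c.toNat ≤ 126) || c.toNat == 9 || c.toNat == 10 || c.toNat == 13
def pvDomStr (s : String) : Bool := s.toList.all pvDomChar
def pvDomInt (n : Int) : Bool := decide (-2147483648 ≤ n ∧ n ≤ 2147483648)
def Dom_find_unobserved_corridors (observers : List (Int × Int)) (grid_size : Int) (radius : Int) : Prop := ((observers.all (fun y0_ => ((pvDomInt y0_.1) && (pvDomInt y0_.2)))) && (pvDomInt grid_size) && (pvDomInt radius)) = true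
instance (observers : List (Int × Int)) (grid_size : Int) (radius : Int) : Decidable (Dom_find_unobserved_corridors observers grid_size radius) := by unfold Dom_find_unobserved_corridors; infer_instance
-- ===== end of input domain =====

-- B computes the uncovered region by a direct per-cell observer-distance test (no per-observer
-- stamping, no coverage set) and grows each corridor by level-synchronous frontier expansion
-- against a shrinking pool of unassigned cells (objective: alternative; not faster).

-- ===== PORT A =====
-- the grid comprehension {(x, y) for x in range(n) for y in range(n)} (appears in both Pythons)
def pvGridCells (grid_size : Int) : List (Int × Int) :=
  (PySem.List.pyRange 0 grid_size 1).flatMap (fun x =>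
    (PySem.List.pyRange 0 grid_size 1).map (fun y => (x, y)))

-- helper: compute_coverage (same module)
def compute_coverage (observers : List (Int × Int)) (grid_size : Int) (radius : Int) : PySem.Set (Int × Int) :=
  observers.foldl (fun covered o =>
    (PySem.List.pyRange (max 0 (o.1 - radius)) (min grid_size (o.1 + radius + 1)) 1).foldl (fun covered x =>
      (PySem.List.pyRange (max 0 (o.2 - radius)) (min grid_size (o.2 + radius + 1)) 1).foldl (fun covered y =>
        if |x - o.1| + |y - o.2| ≤ radius then PySem.Set.add covered (x, y) else covered)
        covered) covered) PySem.Set.empty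

-- A's inner 'while queue' BFS; fuel only makes the loop total (4*|uncovered|+1 suffices, proved below)
def pvBfsA (unc : PySem.Set (Int × Int)) :
    Nat → List (Int × Int) → PySem.Set (Int × Int) → PySem.Set (Int × Int) →
    PySem.Set (Int × Int) × PySem.Set (Int × Int)
  | 0, _, vis, corr => (vis, corr)
  | _ + 1, [], vis, corr => (vis, corr)
  | f + 1, c :: rest, vis, corr =>
    if PySem.Set.contains vis c then pvBfsA unc f rest vis corr
    else
      let vis' := PySem.Set.add vis c
      let corr' := PySem.Set.add corr c
      let new := ([((-1 : Int), (0 : Int)), (1, 0), (0, -1), (0, 1)].map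
          (fun d => (c.1 + d.1, c.2 + d.2))).filter
        (fun nb => PySem.Set.contains unc nb && !(PySem.Set.contains vis' nb))
      pvBfsA unc f (rest ++ new) vis' corr'

def find_unobserved_corridors (observers : List (Int × Int)) (grid_size : Int) (radius : Int) : List (List (Int × Int)) :=
  let covered := compute_coverage observers grid_size radius
  let uncovered := PySem.Set.diff (PySem.Set.ofList (pvGridCells grid_size)) covered
  (uncovered.foldl (fun (st : PySem.Set (Int × Int) × List (List (Int × Int))) start =>
      if PySem.Set.contains st.1 start then st
      else
        let r := pvBfsA uncovered (4 * uncovered.length + 1) [start] st.1 PySem.Set.empty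
        (r.1, st.2 ++ [r.2]))
    (PySem.Set.empty, [])).2

-- ===== PORT B =====
-- B's 'while frontier' loop: one round grows comp/nxt by a fold over the frontier;
-- fuel only makes the loop total (|pool|+1 suffices, proved below)
def pvGrow (pool : PySem.Set (Int × Int)) :
    Nat → PySem.Set (Int × Int) → List (Int × Int) → PySem.Set (Int × Int)
  | 0, comp, _ => comp
  | _ + 1, comp, [] => comp
  | f + 1, comp, c :: rest =>
    let r := (c :: rest).foldl (fun (st : List (Int × Int) × PySem.Set (Int × Int)) c =>
      let new := [(c.1 - 1, c.2), (c.1 + 1, c.2), (c.1, c.2 - 1), (c.1, c.2 + 1)].filter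
        (fun nb => PySem.Set.contains pool nb && !(PySem.Set.contains st.2 nb))
      (st.1 ++ new, PySem.Set.update st.2 new)) ([], comp)
    pvGrow pool f r.2 r.1

def find_unobserved_corridors_alt (observers : List (Int × Int)) (grid_size : Int) (radius : Int) : List (List (Int × Int)) :=
  let covered := PySem.Set.ofList ((pvGridCells grid_size).filter (fun c =>
    observers.any (fun o => decide (|c.1 - o.1| + |c.2 - o.2| ≤ radius))))
  let uncovered := PySem.Set.diff (PySem.Set.ofList (pvGridCells grid_size)) covered
  (uncovered.foldl (fun (st : PySem.Set (Int × Int) × List (List (Int × Int))) start =>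
      if PySem.Set.contains st.1 start then
        let comp := pvGrow st.1 (st.1.length + 1) (PySem.Set.add PySem.Set.empty start) [start]
        (PySem.Set.diff st.1 comp, st.2 ++ [comp])
      else st)
    (PySem.Set.ofList uncovered, [])).2

-- ===== PRECONDITION & SPEC =====
def Spec_find_unobserved_corridors (observers : List (Int × Int)) (grid_size : Int) (radius : Int) (out : List (List (Int × Int))) : Prop := out = find_unobserved_corridors_alt observers grid_size radius
instance (observers : List (Int × Int)) (grid_size : Int) (radius : Int) (out : List (List (Int × Int))) : Decidable (Spec_find_unobserved_corridors observers grid_size radius out) := by unfold Spec_find_unobserved_corridors; infer_instance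

-- ===== CLAIM (what is proved, stated in full; the proofs are below) =====
def Claim_equal_find_unobserved_corridors : Prop := ∀ (observers : List (Int × Int)) (grid_size : Int) (radius : Int), Dom_find_unobserved_corridors observers grid_size radius → Spec_find_unobserved_corridors observers grid_size radius (find_unobserved_corridors observers grid_size radius)

-- ===== LEMMAS AND PROOFS =====
theorem pv_contains_eq {α : Type} [BEq α] [LawfulBEq α] (s : PySem.Set α) (x : α) :
    PySem.Set.contains s x = decide (x ∈ s) := by
  by_cases h : x ∈ s <;> simp [h]

-- proof-only intermediate: mark-on-enqueue cursor BFS (done = processed prefix, todo = rest)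
def pvBfsB (cells : PySem.Set (Int × Int)) :
    Nat → List (Int × Int) → List (Int × Int) → PySem.Set (Int × Int) →
    List (Int × Int) × PySem.Set (Int × Int)
  | 0, done, todo, seen => (done ++ todo, seen)
  | _ + 1, done, [], seen => (done, seen)
  | f + 1, done, c :: todo, seen =>
    let new := [(c.1 - 1, c.2), (c.1 + 1, c.2), (c.1, c.2 - 1), (c.1, c.2 + 1)].filter
      (fun nb => PySem.Set.contains cells nb && !(PySem.Set.contains seen nb))
    pvBfsB cells f (done ++ [c]) (todo ++ new) (PySem.Set.update seen new)

def pvDdf : List (Int × Int) → List (Int × Int)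
  | [] => []
  | a :: l => a :: (pvDdf l).filter (fun b => b ≠ a)

@[simp] theorem pv_mem_ddf (x : Int × Int) (l : List (Int × Int)) : x ∈ pvDdf l ↔ x ∈ l := by
  induction l with
  | nil => simp [pvDdf]
  | cons a l ih =>
    by_cases hx : x = a <;> simp [pvDdf, List.mem_filter, ih, hx]

theorem pv_ddf_filter (p : Int × Int → Bool) (l : List (Int × Int)) :
    (pvDdf l).filter p = pvDdf (l.filter p) := by
  induction l with
  | nil => simp [pvDdf]
  | cons a l ih =>
    by_cases hp : p a
    · simp only [pvDdf, List.filter_cons, hp, if_pos, List.filter_filter]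
      rw [show (fun b => p b && decide (b ≠ a)) = (fun b => decide (b ≠ a) && p b) by
        funext b; exact Bool.and_comm _ _]
      rw [← List.filter_filter, ih]
    · simp only [pvDdf, List.filter_cons, hp]
      simp only [Bool.false_eq_true, List.filter_filter]
      rw [show (fun b => p b && decide (b ≠ a)) = (fun b => decide (b ≠ a) && p b) by
        funext b; exact Bool.and_comm _ _]
      rw [← List.filter_filter, ih]
      apply List.filter_eq_self.mpr
      intro b hb
      simp only [pv_mem_ddf, List.mem_filter] at hb
      simp only [ne_eq, decide_eq_true_eq]
      rintro rfl
      rw [hb.2] at hp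
      exact hp rfl

theorem pv_ddf_of_nodup (l : List (Int × Int)) (h : l.Nodup) : pvDdf l = l := by
  induction l with
  | nil => simp [pvDdf]
  | cons a l ih =>
    simp only [pvDdf]
    rw [ih (List.nodup_cons.mp h).2]
    rw [List.filter_eq_self.mpr]
    intro b hb
    simp only [ne_eq, decide_eq_true_eq]
    rintro rfl
    exact (List.nodup_cons.mp h).1 hb

theorem pv_ddf_append (l m : List (Int × Int)) :
    pvDdf (l ++ m) = pvDdf l ++ (pvDdf m).filter (fun x => decide (x ∉ l)) := by
  induction l with
  | nil => simp [pvDdf]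
  | cons a l ih =>
    simp only [List.cons_append, pvDdf, ih, List.filter_append, List.filter_filter]
    congr 2
    apply List.filter_congr
    intro x _
    by_cases h1 : x ∈ l <;> by_cases h2 : x = a <;> simp [h1, h2]

theorem pv_count_one (c : Int × Int) (p : Int × Int → Bool) (hp : p c = true) :
    ∀ (l : List (Int × Int)), l.Nodup → c ∈ l →
    (l.filter (fun x => p x && !(x == c))).length + 1 = (l.filter p).length := by
  intro l
  induction l with
  | nil => simp
  | cons a l ih =>
    intro hnd hc
    rcases List.mem_cons.mp hc with rfl | hc'
    · have ha : c ∉ l := (List.nodup_cons.mp hnd).1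
      have h1 : l.filter (fun x => p x && !(x == c)) = l.filter p := by
        apply List.filter_congr
        intro x hx
        have : x ≠ c := by rintro rfl; exact ha hx
        simp [this]
      simp [List.filter_cons, hp, h1]
    · have hca : ¬(c = a) := by
        rintro rfl; exact (List.nodup_cons.mp hnd).1 hc'
      by_cases hpa : p a = true
      · have hne : (a == c) = false := by
          simp [beq_eq_false_iff_ne]; rintro rfl; exact hca rfl
        simp only [List.filter_cons, hpa, hne, Bool.not_false, Bool.and_true, if_pos,
          List.length_cons]
        have := ih (List.nodup_cons.mp hnd).2 hc'
        omega
      · have hpa' : (p a && !(a == c)) = false := by simp [hpa]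
        simp only [List.filter_cons, hpa, hpa', Bool.false_and, Bool.false_eq_true, if_false]
        exact ih (List.nodup_cons.mp hnd).2 hc'

theorem pv_count_many :
    ∀ (new : List (Int × Int)) (p : Int × Int → Bool) (l : List (Int × Int)), l.Nodup → new.Nodup →
    (∀ x ∈ new, x ∈ l) → (∀ x ∈ new, p x = true) →
    (l.filter (fun x => p x && decide (x ∉ new))).length + new.length = (l.filter p).length := by
  intro new
  induction new with
  | nil => intro p l _ _ _ _; simp
  | cons a nw ih =>
    intro p l hl hnd hsub hp
    have h1 := pv_count_one a p (hp a (by simp)) l hl (hsub a (by simp))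
    have h2 := ih (fun x => p x && !(x == a)) l hl (List.nodup_cons.mp hnd).2
      (fun x hx => hsub x (by simp [hx]))
      (fun x hx => by
        have hxa : ¬(x = a) := by rintro rfl; exact (List.nodup_cons.mp hnd).1 hx
        simp [hp x (by simp [hx]), hxa])
    have h3 : l.filter (fun x => (p x && !(x == a)) && decide (x ∉ nw)) =
        l.filter (fun x => p x && decide (x ∉ a :: nw)) := by
      apply List.filter_congr
      intro x _
      by_cases h4 : x = a <;> by_cases h5 : x ∈ nw <;> simp [h4, h5]
    rw [h3] at h2
    simp only [List.length_cons]
    omega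

theorem pv_nbrsA_eq (c : Int × Int) :
    ([((-1 : Int), (0 : Int)), (1, 0), (0, -1), (0, 1)].map (fun d => (c.1 + d.1, c.2 + d.2))) =
    [(c.1 - 1, c.2), (c.1 + 1, c.2), (c.1, c.2 - 1), (c.1, c.2 + 1)] := by
  simp [Prod.ext_iff]
  omega

theorem pv_nbrs_nodup (c : Int × Int) :
    [(c.1 - 1, c.2), (c.1 + 1, c.2), (c.1, c.2 - 1), (c.1, c.2 + 1)].Nodup := by
  simp [Prod.ext_iff]
  omega

theorem pv_bfs_ref (unc : List (Int × Int)) (hnd : unc.Nodup) :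
    ∀ (fa : Nat) (q done todo vis seen corr : List (Int × Int)) (fb : Nat),
    (∀ c ∈ q, c ∈ unc) →
    todo = pvDdf (q.filter (fun c => !(PySem.Set.contains vis c))) →
    (∀ x, x ∈ seen ↔ x ∈ vis ∨ x ∈ todo) →
    corr = done →
    (∀ x ∈ done, x ∈ vis) →
    fa ≥ q.length + 4 * (unc.filter (fun x => !(PySem.Set.contains vis x))).length →
    fb ≥ todo.length + (unc.filter (fun x => !(PySem.Set.contains seen x))).length →
    (pvBfsA unc fa q vis corr).2 = (pvBfsB unc fb done todo seen).1 ∧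
    (∀ x, x ∈ (pvBfsA unc fa q vis corr).1 ↔ x ∈ (pvBfsB unc fb done todo seen).2) := by
  intro fa
  induction fa with
  | zero =>
    intro q done todo vis seen corr fb hq htodo hseen hcorr hdone hfa hfb
    have hq0 : q = [] := List.length_eq_zero_iff.mp (by omega)
    subst hq0
    have ht0 : todo = [] := by simpa [pvDdf] using htodo
    subst ht0
    cases fb <;>
      exact ⟨by simpa [pvBfsA, pvBfsB] using hcorr,
        fun x => by simpa [pvBfsA, pvBfsB] using (hseen x).symm.trans (by simp)⟩
  | succ f ih =>
    intro q done todo vis seen corr fb hq htodo hseen hcorr hdone hfa hfb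
    cases q with
    | nil =>
      have ht0 : todo = [] := by simpa [pvDdf] using htodo
      subst ht0
      cases fb <;>
        exact ⟨by simpa [pvBfsA, pvBfsB] using hcorr,
          fun x => by simpa [pvBfsA, pvBfsB] using (hseen x).symm.trans (by simp)⟩
    | cons c rest =>
      by_cases hv : PySem.Set.contains vis c = true
      · simp only [pvBfsA]
        rw [if_pos hv]
        apply ih rest done todo vis seen corr fb (fun x hx => hq x (by simp [hx]))
          (by rw [htodo]; congr 1; simp [List.filter_cons, hv, (PySem.Set.contains_iff vis c).mp hv])
          hseen hcorr hdone (by simp at hfa ⊢; omega) hfb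
      · -- c is new
        have hcv : c ∉ vis := fun h => hv ((PySem.Set.contains_iff vis c).mpr h)
        have hcu : c ∈ unc := hq c (by simp)
        set nbrs := [(c.1 - 1, c.2), (c.1 + 1, c.2), (c.1, c.2 - 1), (c.1, c.2 + 1)] with hnbrs
        set vis' := PySem.Set.add vis c with hvis'
        set newA := nbrs.filter (fun nb => PySem.Set.contains unc nb && !(PySem.Set.contains vis' nb)) with hnewA
        set newB := nbrs.filter (fun nb => PySem.Set.contains unc nb && !(PySem.Set.contains seen nb)) with hnewB
        set tail := pvDdf (rest.filter (fun x => !(PySem.Set.contains vis' x))) with htail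
        have hmem_vis' : ∀ x, x ∈ vis' ↔ (x ∈ vis ∨ x = c) := fun x => PySem.Set.mem_add vis c x
        have hfilter_vis' : ∀ (l : List (Int × Int)),
            l.filter (fun x => !(PySem.Set.contains vis' x)) =
            l.filter (fun x => (!(PySem.Set.contains vis x)) && !(x == c)) := by
          intro l
          apply List.filter_congr
          intro x _
          simp only [pv_contains_eq, hmem_vis']
          by_cases h1 : x ∈ vis <;> by_cases h2 : x = c <;> simp [h1, h2]
        have htodoc : todo = c :: tail := by
          rw [htodo, List.filter_cons]
          have : (!PySem.Set.contains vis c) = true := by simp [pv_contains_eq, hcv]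
          rw [this]
          simp only [if_pos]
          rw [show pvDdf (c :: List.filter (fun c => !PySem.Set.contains vis c) rest) =
              c :: (pvDdf (List.filter (fun c => !PySem.Set.contains vis c) rest)).filter (fun b => b ≠ c) from rfl]
          congr 1
          rw [pv_ddf_filter, List.filter_filter, htail, hfilter_vis']
          congr 1
          apply List.filter_congr
          intro x _
          by_cases hx : x = c <;> by_cases h2 : x ∈ vis <;> simp [pv_contains_eq, hx, h2]
        have hmem_tail : ∀ x, x ∈ tail ↔ (x ∈ rest ∧ x ∉ vis ∧ x ≠ c) := by
          intro x
          rw [htail, pv_mem_ddf, List.mem_filter]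
          simp only [pv_contains_eq, hmem_vis']
          by_cases h1 : x ∈ rest <;> by_cases h2 : x ∈ vis <;> by_cases h3 : x = c <;>
            simp [h1, h2, h3]
        have hmem_newB : ∀ x, x ∈ newB ↔ (x ∈ nbrs ∧ x ∈ unc ∧ x ∉ seen) := by
          intro x
          rw [hnewB, List.mem_filter]
          simp only [pv_contains_eq]
          by_cases h1 : x ∈ unc <;> by_cases h2 : x ∈ seen <;> simp [h1, h2]
        have hfb1 : 1 ≤ fb := by rw [htodoc] at hfb; simp at hfb; omega
        obtain ⟨fb', rfl⟩ : ∃ fb', fb = fb' + 1 := ⟨fb - 1, by omega⟩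
        -- reduce both sides one step
        rw [htodoc]
        simp only [pvBfsA, pvBfsB]
        rw [if_neg hv, pv_nbrsA_eq]
        -- the A-side new list is newA, the B-side one is newB
        apply ih (rest ++ newA) (done ++ [c]) (tail ++ newB) vis'
          (PySem.Set.update seen newB) (PySem.Set.add corr c) fb'
        · intro x hx
          rcases List.mem_append.mp hx with h1 | h1
          · exact hq x (by simp [h1])
          · have h2 := (List.mem_filter.mp h1).2
            simp only [Bool.and_eq_true] at h2
            exact (PySem.Set.contains_iff unc x).mp h2.1
        · -- todo invariant
          rw [List.filter_append, pv_ddf_append]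
          have e1 : newA.filter (fun x => !(PySem.Set.contains vis' x)) = newA := by
            apply List.filter_eq_self.mpr
            intro x hx
            have h2 := (List.mem_filter.mp hx).2
            simp only [Bool.and_eq_true] at h2
            exact h2.2
          have e2 : pvDdf newA = newA :=
            pv_ddf_of_nodup _ (List.Nodup.filter _ (pv_nbrs_nodup c))
          rw [e1, e2, ← htail]
          congr 1
          rw [hnewA, List.filter_filter]
          rw [hnewB]
          apply List.filter_congr
          intro x _
          simp only [pv_contains_eq, hmem_vis', hseen, htodoc, hmem_tail, List.mem_filter,
            List.mem_cons]
          by_cases h1 : x ∈ unc <;> by_cases h2 : x ∈ vis <;> by_cases h3 : x = c <;>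
            by_cases h4 : x ∈ rest <;> simp [h1, h2, h3, h4]
        · -- seen invariant
          intro x
          rw [PySem.Set.mem_update, hseen x, htodoc, hmem_vis']
          simp only [List.mem_append, List.mem_cons]
          tauto
        · -- corr
          rw [hcorr]
          exact PySem.Set.add_of_not_mem (fun h => hcv (hdone c h))
        · -- done ⊆ vis'
          intro x hx
          rcases List.mem_append.mp hx with h1 | h1
          · exact (hmem_vis' x).mpr (Or.inl (hdone x h1))
          · simp only [List.mem_singleton] at h1
            exact (hmem_vis' x).mpr (Or.inr h1)
        · -- fuel A
          have hlen : newA.length ≤ 4 := by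
            calc newA.length ≤ nbrs.length := List.length_filter_le _ _
            _ = 4 := by rw [hnbrs]; rfl
          have hcnt := pv_count_one c (fun x => !(PySem.Set.contains vis x))
            (by simp [pv_contains_eq, hcv]) unc hnd hcu
          have hcnt' : (unc.filter (fun x => (!(PySem.Set.contains vis x)) && !(x == c))).length + 1 =
              (unc.filter (fun x => !(PySem.Set.contains vis x))).length := hcnt
          clear hcnt
          rw [hfilter_vis' unc]
          simp only [List.length_append, List.length_cons] at hfa ⊢
          omega
        · -- fuel B
          have hnewB_nodup : newB.Nodup := List.Nodup.filter _ (pv_nbrs_nodup c)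
          have hcnt := pv_count_many newB (fun x => !(PySem.Set.contains seen x)) unc hnd
            hnewB_nodup
            (fun x hx => ((hmem_newB x).mp hx).2.1)
            (fun x hx => by simp [pv_contains_eq, ((hmem_newB x).mp hx).2.2])
          have hcnt' : (unc.filter (fun x => (!(PySem.Set.contains seen x)) && decide (x ∉ newB))).length + newB.length =
              (unc.filter (fun x => !(PySem.Set.contains seen x))).length := hcnt
          clear hcnt
          have e3 : unc.filter (fun x => !(PySem.Set.contains (PySem.Set.update seen newB) x)) =
              unc.filter (fun x => (!(PySem.Set.contains seen x)) && decide (x ∉ newB)) := by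
            apply List.filter_congr
            intro x _
            simp only [pv_contains_eq, PySem.Set.mem_update]
            by_cases h1 : x ∈ seen <;> by_cases h2 : x ∈ newB <;> simp [h1, h2]
          rw [e3]
          rw [htodoc] at hfb
          simp only [List.length_append, List.length_cons] at hfb ⊢
          omega


theorem pv_foldl_add_append (l : List (Int × Int)) (s : PySem.Set (Int × Int))
    (hnd : l.Nodup) (hdisj : ∀ x ∈ l, x ∉ s) : l.foldl PySem.Set.add s = s ++ l := by
  induction l generalizing s with
  | nil => simp
  | cons a t ih =>
    simp only [List.foldl_cons]
    rw [PySem.Set.add_of_not_mem (hdisj a (by simp))]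
    rw [ih _ (hnd.of_cons) ?_]
    · simp
    · intro x hx
      simp only [List.mem_append, List.mem_singleton]
      rintro (h1 | rfl)
      · exact hdisj x (by simp [hx]) h1
      · exact (List.nodup_cons.mp hnd).1 hx

-- one frontier round, as a fold (matches pvGrow's inner fold and pvBfsB's per-cell steps)
def pvCR (cells : PySem.Set (Int × Int)) (gen acc : List (Int × Int)) (seen : PySem.Set (Int × Int)) :
    List (Int × Int) × PySem.Set (Int × Int) :=
  gen.foldl (fun (st : List (Int × Int) × PySem.Set (Int × Int)) c =>
    let new := [(c.1 - 1, c.2), (c.1 + 1, c.2), (c.1, c.2 - 1), (c.1, c.2 + 1)].filter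
      (fun nb => PySem.Set.contains cells nb && !(PySem.Set.contains st.2 nb))
    (st.1 ++ new, PySem.Set.update st.2 new)) (acc, seen)

theorem pv_round (cells : PySem.Set (Int × Int)) :
    ∀ (gen : List (Int × Int)) (f : Nat) (done acc : List (Int × Int)) (seen : PySem.Set (Int × Int)),
    pvBfsB cells (gen.length + f) done (gen ++ acc) seen =
      pvBfsB cells f (done ++ gen) (pvCR cells gen acc seen).1 (pvCR cells gen acc seen).2 := by
  intro gen
  induction gen with
  | nil => intro f done acc seen; simp [pvCR]
  | cons c g ih =>
    intro f done acc seen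
    have hlen : (c :: g).length + f = (g.length + f) + 1 := by simp; omega
    rw [hlen]
    show pvBfsB cells ((g.length + f) + 1) done (c :: (g ++ acc)) seen = _
    rw [show pvBfsB cells ((g.length + f) + 1) done (c :: (g ++ acc)) seen =
        pvBfsB cells (g.length + f) (done ++ [c])
          ((g ++ acc) ++ ([(c.1 - 1, c.2), (c.1 + 1, c.2), (c.1, c.2 - 1), (c.1, c.2 + 1)].filter
            (fun nb => PySem.Set.contains cells nb && !(PySem.Set.contains seen nb))))
          (PySem.Set.update seen ([(c.1 - 1, c.2), (c.1 + 1, c.2), (c.1, c.2 - 1), (c.1, c.2 + 1)].filter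
            (fun nb => PySem.Set.contains cells nb && !(PySem.Set.contains seen nb)))) from rfl]
    rw [List.append_assoc, ih]
    simp [pvCR]


theorem pv_fold_rel (unc pool : PySem.Set (Int × Int)) :
    ∀ (gen acc : List (Int × Int)) (seen comp : PySem.Set (Int × Int)),
    (∀ x, (x ∈ unc ∧ x ∉ seen) ↔ (x ∈ pool ∧ x ∉ comp)) →
    ∃ t : List (Int × Int),
      (pvCR unc gen acc seen).1 = acc ++ t ∧
      (pvCR pool gen acc comp).1 = acc ++ t ∧
      (pvCR pool gen acc comp).2 = comp ++ t ∧
      t.Nodup ∧ (∀ x ∈ t, x ∈ unc ∧ x ∉ seen) ∧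
      (∀ x, x ∈ (pvCR unc gen acc seen).2 ↔ x ∈ seen ∨ x ∈ t) := by
  intro gen
  induction gen with
  | nil =>
    intro acc seen comp hIeq
    exact ⟨[], by simp [pvCR], by simp [pvCR], by simp [pvCR], by simp, by simp,
      fun x => by simp [pvCR]⟩
  | cons c g ih =>
    intro acc seen comp hIeq
    have hb : ∀ (s t : PySem.Set (Int × Int)) (nb : Int × Int),
        (PySem.Set.contains s nb && !(PySem.Set.contains t nb)) = decide (nb ∈ s ∧ nb ∉ t) := by
      intro s t nb; by_cases h1 : nb ∈ s <;> by_cases h2 : nb ∈ t <;> simp [pv_contains_eq, h1, h2]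
    set newC := [(c.1 - 1, c.2), (c.1 + 1, c.2), (c.1, c.2 - 1), (c.1, c.2 + 1)].filter
      (fun nb => PySem.Set.contains unc nb && !(PySem.Set.contains seen nb)) with hnC
    set newG := [(c.1 - 1, c.2), (c.1 + 1, c.2), (c.1, c.2 - 1), (c.1, c.2 + 1)].filter
      (fun nb => PySem.Set.contains pool nb && !(PySem.Set.contains comp nb)) with hnG
    have hnew : newG = newC := by
      rw [hnG, hnC]
      apply List.filter_congr
      intro nb _
      rw [hb, hb]
      exact decide_eq_decide.mpr (hIeq nb).symm
    have hnodC : newC.Nodup := by rw [hnC]; exact List.Nodup.filter _ (pv_nbrs_nodup c)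
    have hmemC : ∀ x ∈ newC, x ∈ unc ∧ x ∉ seen := by
      intro x hx
      rw [hnC] at hx
      have h2 := (List.mem_filter.mp hx).2
      rw [hb] at h2
      exact of_decide_eq_true h2
    have hstepC : pvCR unc (c :: g) acc seen =
        pvCR unc g (acc ++ newC) (PySem.Set.update seen newC) := rfl
    have hstepG : pvCR pool (c :: g) acc comp =
        pvCR pool g (acc ++ newG) (PySem.Set.update comp newG) := rfl
    have hcompapp : PySem.Set.update comp newC = comp ++ newC := by
      rw [show PySem.Set.update comp newC = newC.foldl PySem.Set.add comp from rfl]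
      exact pv_foldl_add_append newC comp hnodC (fun x hx => ((hIeq x).mp (hmemC x hx)).2)
    have hIeq' : ∀ x, (x ∈ unc ∧ x ∉ PySem.Set.update seen newC) ↔
        (x ∈ pool ∧ x ∉ comp ++ newC) := by
      intro x
      have h := hIeq x
      simp only [PySem.Set.mem_update, List.mem_append]
      tauto
    obtain ⟨t', h1, h2, h3, h4, h5, h6⟩ :=
      ih (acc ++ newC) (PySem.Set.update seen newC) (comp ++ newC) hIeq'
    refine ⟨newC ++ t', ?_, ?_, ?_, ?_, ?_, ?_⟩
    · rw [hstepC, h1, List.append_assoc]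
    · rw [hstepG, hnew, hcompapp, h2, List.append_assoc]
    · rw [hstepG, hnew, hcompapp, h3, List.append_assoc]
    · rw [List.nodup_append]
      refine ⟨hnodC, h4, ?_⟩
      intro a ha b hb
      rintro rfl
      exact (h5 a hb).2 (by simp [PySem.Set.mem_update, ha])
    · intro x hx
      rcases List.mem_append.mp hx with hx | hx
      · exact hmemC x hx
      · have := h5 x hx
        refine ⟨this.1, fun hs => this.2 ?_⟩
        simp [PySem.Set.mem_update, hs]
    · intro x
      rw [hstepC, h6 x]
      simp only [PySem.Set.mem_update, List.mem_append]
      tauto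


theorem pv_grow_cursor (unc pool : PySem.Set (Int × Int)) (hU : unc.Nodup) :
    ∀ (fg : Nat) (gen done : List (Int × Int)) (seen comp : PySem.Set (Int × Int)) (fb : Nat),
    (∀ x, (x ∈ unc ∧ x ∉ seen) ↔ (x ∈ pool ∧ x ∉ comp)) →
    comp = done ++ gen →
    (gen = [] ∨ fg ≥ (unc.filter (fun x => !(PySem.Set.contains seen x))).length + 1) →
    fb ≥ gen.length + (unc.filter (fun x => !(PySem.Set.contains seen x))).length →
    pvGrow pool fg comp gen = (pvBfsB unc fb done gen seen).1 ∧
    (∀ x, (x ∈ unc ∧ x ∉ (pvBfsB unc fb done gen seen).2) ↔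
      (x ∈ pool ∧ x ∉ pvGrow pool fg comp gen)) := by
  intro fg
  induction fg with
  | zero =>
    intro gen done seen comp fb hIeq hcomp hfg hfb
    have hg : gen = [] := by
      rcases hfg with h | h
      · exact h
      · omega
    subst hg
    cases fb with
    | zero =>
      refine ⟨?_, fun x => hIeq x⟩
      show comp = done ++ []
      exact hcomp
    | succ n =>
      refine ⟨?_, fun x => hIeq x⟩
      show comp = done
      simpa using hcomp
  | succ f ih =>
    intro gen done seen comp fb hIeq hcomp hfg hfb
    cases gen with
    | nil =>
      cases fb with
      | zero =>
        refine ⟨?_, fun x => hIeq x⟩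
        show comp = done ++ []
        exact hcomp
      | succ n =>
        refine ⟨?_, fun x => hIeq x⟩
        show comp = done
        simpa using hcomp
    | cons c g =>
      have hfg' : f + 1 ≥ (unc.filter (fun x => !(PySem.Set.contains seen x))).length + 1 := by
        rcases hfg with h | h
        · exact absurd h (by simp)
        · exact h
      have hlen : fb ≥ (c :: g).length := by
        simp only [List.length_cons] at hfb ⊢; omega
      obtain ⟨f', hf'⟩ : ∃ f', fb = (c :: g).length + f' := ⟨fb - (c :: g).length, by omega⟩
      obtain ⟨t, h1, h2, h3, h4, h5, h6⟩ := pv_fold_rel unc pool (c :: g) [] seen comp hIeq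
      rw [List.nil_append] at h1 h2
      have e1 : pvBfsB unc fb done (c :: g) seen =
          pvBfsB unc f' (done ++ (c :: g)) t (pvCR unc (c :: g) [] seen).2 := by
        rw [hf']
        have hr := pv_round unc (c :: g) f' done [] seen
        rw [List.append_nil] at hr
        rw [hr, h1]
      have e2 : pvGrow pool (f + 1) comp (c :: g) = pvGrow pool f (comp ++ t) t := by
        rw [show pvGrow pool (f + 1) comp (c :: g) =
            pvGrow pool f (pvCR pool (c :: g) [] comp).2 (pvCR pool (c :: g) [] comp).1 from rfl,
          h3, h2]
      have hcnt := pv_count_many t (fun x => !(PySem.Set.contains seen x)) unc hU h4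
        (fun x hx => (h5 x hx).1)
        (fun x hx => by simp [pv_contains_eq, (h5 x hx).2])
      have hcnt' : (unc.filter (fun x => (!(PySem.Set.contains seen x)) && decide (x ∉ t))).length
          + t.length = (unc.filter (fun x => !(PySem.Set.contains seen x))).length := hcnt
      clear hcnt
      have hfilt : unc.filter (fun x => !(PySem.Set.contains (pvCR unc (c :: g) [] seen).2 x)) =
          unc.filter (fun x => (!(PySem.Set.contains seen x)) && decide (x ∉ t)) := by
        apply List.filter_congr
        intro x _
        simp only [pv_contains_eq, h6 x]
        by_cases hx1 : x ∈ seen <;> by_cases hx2 : x ∈ t <;> simp [hx1, hx2]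
      have hIeq2 : ∀ x, (x ∈ unc ∧ x ∉ (pvCR unc (c :: g) [] seen).2) ↔
          (x ∈ pool ∧ x ∉ comp ++ t) := by
        intro x
        have h := hIeq x
        simp only [h6 x, List.mem_append]
        tauto
      obtain ⟨ihA, ihB⟩ := ih t (done ++ (c :: g)) (pvCR unc (c :: g) [] seen).2 (comp ++ t) f'
        hIeq2
        (by rw [hcomp, List.append_assoc])
        (by
          by_cases ht : t = []
          · exact Or.inl ht
          · right
            have htl : t.length ≥ 1 := by
              cases t with
              | nil => exact absurd rfl ht
              | cons a b => simp
            rw [hfilt]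
            omega)
        (by
          rw [hfilt]
          simp only [List.length_cons] at hfb hf'
          omega)
      exact ⟨by rw [e2, e1, ihA], fun x => by rw [e2, e1]; exact ihB x⟩


theorem pv_filter_len_eq (unc pool seen comp : PySem.Set (Int × Int)) (hU : unc.Nodup)
    (hP : pool.Nodup)
    (hIeq : ∀ x, (x ∈ unc ∧ x ∉ seen) ↔ (x ∈ pool ∧ x ∉ comp)) :
    (unc.filter (fun x => !(PySem.Set.contains seen x))).length =
    (pool.filter (fun x => !(PySem.Set.contains comp x))).length := by
  apply List.Perm.length_eq
  rw [List.perm_ext_iff_of_nodup (hU.filter _) (hP.filter _)]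
  intro a
  simp only [List.mem_filter, pv_contains_eq, Bool.not_eq_eq_eq_not, Bool.not_true,
    decide_eq_false_iff_not]
  exact hIeq a

theorem pv_mem_foldl {α : Type} (g : PySem.Set (Int × Int) → α → PySem.Set (Int × Int))
    (Q : α → (Int × Int) → Prop)
    (hg : ∀ (s : PySem.Set (Int × Int)) (a : α) (x : Int × Int), x ∈ g s a ↔ x ∈ s ∨ Q a x) :
    ∀ (l : List α) (s0 : PySem.Set (Int × Int)) (x : Int × Int),
    x ∈ l.foldl g s0 ↔ x ∈ s0 ∨ ∃ a ∈ l, Q a x := by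
  intro l
  induction l with
  | nil => intro s0 x; simp
  | cons a t ih =>
    intro s0 x
    rw [List.foldl_cons, ih, hg]
    constructor
    · rintro ((h | h) | ⟨b, hb, hQ⟩)
      · exact Or.inl h
      · exact Or.inr ⟨a, by simp, h⟩
      · exact Or.inr ⟨b, by simp [hb], hQ⟩
    · rintro (h | ⟨b, hb, hQ⟩)
      · exact Or.inl (Or.inl h)
      · rcases List.mem_cons.mp hb with rfl | hb'
        · exact Or.inl (Or.inr hQ)
        · exact Or.inr ⟨b, hb', hQ⟩

theorem pv_mem_cov (observers : List (Int × Int)) (grid_size radius : Int) (c : Int × Int) :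
    c ∈ compute_coverage observers grid_size radius ↔
    ∃ o ∈ observers,
      ∃ xx ∈ PySem.List.pyRange (max 0 (o.1 - radius)) (min grid_size (o.1 + radius + 1)) 1,
      ∃ yy ∈ PySem.List.pyRange (max 0 (o.2 - radius)) (min grid_size (o.2 + radius + 1)) 1,
      (|xx - o.1| + |yy - o.2| ≤ radius ∧ c = (xx, yy)) := by
  have hinner : ∀ (o : Int × Int) (xx : Int) (s : PySem.Set (Int × Int)) (x : Int × Int),
      x ∈ (PySem.List.pyRange (max 0 (o.2 - radius)) (min grid_size (o.2 + radius + 1)) 1).foldl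
        (fun covered y =>
          if |xx - o.1| + |y - o.2| ≤ radius then PySem.Set.add covered (xx, y) else covered) s ↔
      x ∈ s ∨ ∃ yy ∈ PySem.List.pyRange (max 0 (o.2 - radius)) (min grid_size (o.2 + radius + 1)) 1,
        (|xx - o.1| + |yy - o.2| ≤ radius ∧ x = (xx, yy)) := by
    intro o xx s x
    exact pv_mem_foldl _ (fun yy x => |xx - o.1| + |yy - o.2| ≤ radius ∧ x = (xx, yy))
      (fun s y x => by
        split_ifs with hcond
        · rw [PySem.Set.mem_add]; tauto
        · tauto) _ s x
  have hmid : ∀ (o : Int × Int) (s : PySem.Set (Int × Int)) (x : Int × Int),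
      x ∈ (PySem.List.pyRange (max 0 (o.1 - radius)) (min grid_size (o.1 + radius + 1)) 1).foldl
        (fun covered xx =>
          (PySem.List.pyRange (max 0 (o.2 - radius)) (min grid_size (o.2 + radius + 1)) 1).foldl
            (fun covered y =>
              if |xx - o.1| + |y - o.2| ≤ radius then PySem.Set.add covered (xx, y) else covered)
            covered) s ↔
      x ∈ s ∨ ∃ xx ∈ PySem.List.pyRange (max 0 (o.1 - radius)) (min grid_size (o.1 + radius + 1)) 1,
        ∃ yy ∈ PySem.List.pyRange (max 0 (o.2 - radius)) (min grid_size (o.2 + radius + 1)) 1,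
        (|xx - o.1| + |yy - o.2| ≤ radius ∧ x = (xx, yy)) := by
    intro o s x
    exact pv_mem_foldl _
      (fun xx x => ∃ yy ∈ PySem.List.pyRange (max 0 (o.2 - radius)) (min grid_size (o.2 + radius + 1)) 1,
        (|xx - o.1| + |yy - o.2| ≤ radius ∧ x = (xx, yy)))
      (fun s xx x => hinner o xx s x) _ s x
  have h := pv_mem_foldl _
    (fun (o : Int × Int) (x : Int × Int) =>
      ∃ xx ∈ PySem.List.pyRange (max 0 (o.1 - radius)) (min grid_size (o.1 + radius + 1)) 1,
      ∃ yy ∈ PySem.List.pyRange (max 0 (o.2 - radius)) (min grid_size (o.2 + radius + 1)) 1,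
      (|xx - o.1| + |yy - o.2| ≤ radius ∧ x = (xx, yy)))
    (fun s o x => hmid o s x) observers PySem.Set.empty c
  rw [show compute_coverage observers grid_size radius =
    observers.foldl (fun covered o =>
      (PySem.List.pyRange (max 0 (o.1 - radius)) (min grid_size (o.1 + radius + 1)) 1).foldl
        (fun covered xx =>
          (PySem.List.pyRange (max 0 (o.2 - radius)) (min grid_size (o.2 + radius + 1)) 1).foldl
            (fun covered y =>
              if |xx - o.1| + |y - o.2| ≤ radius then PySem.Set.add covered (xx, y) else covered)
            covered) covered) PySem.Set.empty from rfl]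
  rw [h]
  simp [PySem.Set.empty]

theorem pv_mem_grid (grid_size : Int) (c : Int × Int) :
    c ∈ pvGridCells grid_size ↔ 0 ≤ c.1 ∧ c.1 < grid_size ∧ 0 ≤ c.2 ∧ c.2 < grid_size := by
  unfold pvGridCells
  simp only [List.mem_flatMap, List.mem_map, PySem.List.mem_pyRange_one]
  constructor
  · rintro ⟨xx, hx, yy, hy, h⟩
    rw [← h]
    exact ⟨hx.1, hx.2, hy.1, hy.2⟩
  · intro h
    exact ⟨c.1, ⟨h.1, h.2.1⟩, c.2, ⟨h.2.2.1, h.2.2.2⟩, rfl⟩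

theorem pv_nodup_prod (l1 l2 : List Int) (h1 : l1.Nodup) (h2 : l2.Nodup) :
    (l1.flatMap (fun x => l2.map (fun y => ((x : Int), y)))).Nodup := by
  induction l1 with
  | nil => simp
  | cons a t ih =>
    rw [List.flatMap_cons]
    apply List.Nodup.append
    · exact h2.map (fun y1 y2 h => by simpa using congrArg Prod.snd h)
    · exact ih (List.nodup_cons.mp h1).2
    · intro x hx1 hx2
      obtain ⟨y, _, rfl⟩ := List.mem_map.mp hx1
      obtain ⟨b, hb, hb2⟩ := List.mem_flatMap.mp hx2
      obtain ⟨y2, _, hy2⟩ := List.mem_map.mp hb2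
      have : b = a := by simpa using congrArg Prod.fst hy2
      exact (List.nodup_cons.mp h1).1 (this ▸ hb)

theorem pv_grid_nodup (grid_size : Int) : (pvGridCells grid_size).Nodup :=
  pv_nodup_prod _ _ (PySem.List.nodup_pyRange_one _ _) (PySem.List.nodup_pyRange_one _ _)

theorem pv_cov_iff (observers : List (Int × Int)) (grid_size radius : Int) (c : Int × Int)
    (hc : 0 ≤ c.1 ∧ c.1 < grid_size ∧ 0 ≤ c.2 ∧ c.2 < grid_size) :
    c ∈ compute_coverage observers grid_size radius ↔
    ∃ o ∈ observers, |c.1 - o.1| + |c.2 - o.2| ≤ radius := by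
  rw [pv_mem_cov]
  constructor
  · rintro ⟨o, ho, xx, hxx, yy, hyy, hcond, rfl⟩
    exact ⟨o, ho, by simpa using hcond⟩
  · rintro ⟨o, ho, hd⟩
    have h1 : |c.1 - o.1| ≤ radius := le_trans (le_add_of_nonneg_right (abs_nonneg _)) hd
    have h2 : |c.2 - o.2| ≤ radius := le_trans (le_add_of_nonneg_left (abs_nonneg _)) hd
    have h1' := abs_le.mp h1
    have h2' := abs_le.mp h2
    refine ⟨o, ho, c.1, ?_, c.2, ?_, hd, rfl⟩
    · rw [PySem.List.mem_pyRange_one]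
      exact ⟨max_le hc.1 (by omega), lt_min hc.2.1 (by omega)⟩
    · rw [PySem.List.mem_pyRange_one]
      exact ⟨max_le hc.2.2.1 (by omega), lt_min hc.2.2.2 (by omega)⟩

theorem pv_unc_eq (observers : List (Int × Int)) (grid_size radius : Int) :
    PySem.Set.diff (PySem.Set.ofList (pvGridCells grid_size))
      (compute_coverage observers grid_size radius) =
    PySem.Set.diff (PySem.Set.ofList (pvGridCells grid_size))
      (PySem.Set.ofList ((pvGridCells grid_size).filter (fun c =>
        observers.any (fun o => decide (|c.1 - o.1| + |c.2 - o.2| ≤ radius))))) := by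
  rw [show PySem.Set.ofList (pvGridCells grid_size) = pvGridCells grid_size from
    PySem.Set.ofList_eq_self_of_nodup _ (pv_grid_nodup grid_size)]
  rw [show ∀ (t : PySem.Set (Int × Int)), PySem.Set.diff (pvGridCells grid_size) t =
    (pvGridCells grid_size).filter (fun x => !(PySem.Set.contains t x)) from fun _ => rfl]
  rw [show ∀ (t : PySem.Set (Int × Int)), PySem.Set.diff (pvGridCells grid_size) t =
    (pvGridCells grid_size).filter (fun x => !(PySem.Set.contains t x)) from fun _ => rfl]
  apply List.filter_congr
  intro c hc
  have hbounds := (pv_mem_grid grid_size c).mp hc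
  have h1 := pv_cov_iff observers grid_size radius c hbounds
  have h2 : c ∈ PySem.Set.ofList ((pvGridCells grid_size).filter (fun c =>
      observers.any (fun o => decide (|c.1 - o.1| + |c.2 - o.2| ≤ radius)))) ↔
      ∃ o ∈ observers, |c.1 - o.1| + |c.2 - o.2| ≤ radius := by
    rw [PySem.Set.mem_ofList, List.mem_filter]
    simp [hc, List.any_eq_true]
  rw [pv_contains_eq, pv_contains_eq]
  exact congrArg (fun b => !b) (decide_eq_decide.mpr (h1.trans h2.symm))

theorem pv_outer (unc : PySem.Set (Int × Int)) (hU : unc.Nodup) :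
    ∀ (l : List (Int × Int)), (∀ s ∈ l, s ∈ unc) →
    ∀ (visA pool : PySem.Set (Int × Int)), pool.Nodup →
    (∀ x, x ∈ pool ↔ x ∈ unc ∧ x ∉ visA) →
    ∀ (corrs : List (List (Int × Int))),
    (l.foldl (fun (st : PySem.Set (Int × Int) × List (List (Int × Int))) start =>
        if PySem.Set.contains st.1 start then st
        else
          let r := pvBfsA unc (4 * unc.length + 1) [start] st.1 PySem.Set.empty
          (r.1, st.2 ++ [r.2])) (visA, corrs)).2 =
    (l.foldl (fun (st : PySem.Set (Int × Int) × List (List (Int × Int))) start =>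
        if PySem.Set.contains st.1 start then
          let comp := pvGrow st.1 (st.1.length + 1) (PySem.Set.add PySem.Set.empty start) [start]
          (PySem.Set.diff st.1 comp, st.2 ++ [comp])
        else st) (pool, corrs)).2 := by
  intro l
  induction l with
  | nil => intro _ visA pool _ _ corrs; rfl
  | cons s l ih =>
    intro hl visA pool hP hinv corrs
    have hsu : s ∈ unc := hl s (by simp)
    by_cases h : s ∈ visA
    · have hA : PySem.Set.contains visA s = true := (PySem.Set.contains_iff _ _).mpr h
      have hB : PySem.Set.contains pool s = false := by
        rw [pv_contains_eq]
        simp only [decide_eq_false_iff_not]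
        intro hp
        exact ((hinv s).mp hp).2 h
      simp only [List.foldl_cons]
      rw [if_pos hA, if_neg (by rw [hB]; exact Bool.false_ne_true)]
      exact ih (fun x hx => hl x (by simp [hx])) visA pool hP hinv corrs
    · have hA : ¬ (PySem.Set.contains visA s = true) := by simp [pv_contains_eq, h]
      have hB : PySem.Set.contains pool s = true := by
        rw [pv_contains_eq]; exact decide_eq_true ((hinv s).mpr ⟨hsu, h⟩)
      simp only [List.foldl_cons]
      rw [if_neg hA, if_pos hB]
      have href := pv_bfs_ref unc hU (4 * unc.length + 1) [s] [] [s] visA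
        (PySem.Set.add visA s) PySem.Set.empty (unc.length + 1)
        (fun c hc => by simp only [List.mem_singleton] at hc; exact hc ▸ hsu)
        (by simp [pvDdf, pv_contains_eq, h])
        (fun x => by rw [PySem.Set.mem_add]; simp)
        rfl
        (by simp)
        (by have := List.length_filter_le (fun x => !(PySem.Set.contains visA x)) unc
            simp only [List.length_singleton]; omega)
        (by have := List.length_filter_le
              (fun x => !(PySem.Set.contains (PySem.Set.add visA s) x)) unc
            simp only [List.length_singleton]; omega)
      have hIeq0 : ∀ x, (x ∈ unc ∧ x ∉ PySem.Set.add visA s) ↔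
          (x ∈ pool ∧ x ∉ PySem.Set.add PySem.Set.empty s) := by
        intro x
        rw [PySem.Set.mem_add, PySem.Set.mem_add]
        have := hinv x
        simp only [PySem.Set.empty, List.not_mem_nil, false_or]
        tauto
      have hUg := pv_filter_len_eq unc pool (PySem.Set.add visA s)
        (PySem.Set.add PySem.Set.empty s) hU hP hIeq0
      have hgrow := pv_grow_cursor unc pool hU (pool.length + 1) [s] []
        (PySem.Set.add visA s) (PySem.Set.add PySem.Set.empty s) (unc.length + 1)
        hIeq0 rfl
        (Or.inr (by
          rw [hUg]
          have := List.length_filter_le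
            (fun x => !(PySem.Set.contains (PySem.Set.add PySem.Set.empty s) x)) pool
          omega))
        (by have := List.length_filter_le
              (fun x => !(PySem.Set.contains (PySem.Set.add visA s) x)) unc
            simp only [List.length_singleton]; omega)
      obtain ⟨hg1, hg2⟩ := hgrow
      obtain ⟨ha1, ha2⟩ := href
      have hcorr : (pvBfsA unc (4 * unc.length + 1) [s] visA PySem.Set.empty).2 =
          pvGrow pool (pool.length + 1) (PySem.Set.add PySem.Set.empty s) [s] :=
        ha1.trans hg1.symm
      rw [hcorr]
      apply ih (fun x hx => hl x (by simp [hx]))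
      · exact PySem.Set.nodup_diff _ _ hP
      · intro x
        rw [PySem.Set.mem_diff]
        have e1 := hg2 x
        have e2 := ha2 x
        constructor
        · intro hx
          have := e1.mpr hx
          exact ⟨this.1, fun hv => this.2 (e2.mp hv)⟩
        · intro hx
          exact e1.mp ⟨hx.1, fun hv => hx.2 (e2.mpr hv)⟩

theorem pv_main (observers : List (Int × Int)) (grid_size radius : Int) :
    find_unobserved_corridors observers grid_size radius =
    find_unobserved_corridors_alt observers grid_size radius := by
  have he := pv_unc_eq observers grid_size radius
  have ea : find_unobserved_corridors observers grid_size radius =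
      ((PySem.Set.diff (PySem.Set.ofList (pvGridCells grid_size))
          (compute_coverage observers grid_size radius)).foldl
        (fun (st : PySem.Set (Int × Int) × List (List (Int × Int))) start =>
          if PySem.Set.contains st.1 start then st
          else
            let r := pvBfsA (PySem.Set.diff (PySem.Set.ofList (pvGridCells grid_size))
                (compute_coverage observers grid_size radius))
              (4 * (PySem.Set.diff (PySem.Set.ofList (pvGridCells grid_size))
                (compute_coverage observers grid_size radius)).length + 1) [start] st.1 PySem.Set.empty
            (r.1, st.2 ++ [r.2])) (PySem.Set.empty, [])).2 := rfl
  have eb : find_unobserved_corridors_alt observers grid_size radius =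
      ((PySem.Set.diff (PySem.Set.ofList (pvGridCells grid_size))
          (PySem.Set.ofList ((pvGridCells grid_size).filter (fun c =>
            observers.any (fun o => decide (|c.1 - o.1| + |c.2 - o.2| ≤ radius)))))).foldl
        (fun (st : PySem.Set (Int × Int) × List (List (Int × Int))) start =>
          if PySem.Set.contains st.1 start then
            let comp := pvGrow st.1 (st.1.length + 1) (PySem.Set.add PySem.Set.empty start) [start]
            (PySem.Set.diff st.1 comp, st.2 ++ [comp])
          else st)
        (PySem.Set.ofList (PySem.Set.diff (PySem.Set.ofList (pvGridCells grid_size))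
          (PySem.Set.ofList ((pvGridCells grid_size).filter (fun c =>
            observers.any (fun o => decide (|c.1 - o.1| + |c.2 - o.2| ≤ radius)))))), [])).2 := rfl
  rw [ea, eb, ← he]
  have hnd : (PySem.Set.diff (PySem.Set.ofList (pvGridCells grid_size))
      (compute_coverage observers grid_size radius)).Nodup :=
    PySem.Set.nodup_diff _ _ (PySem.Set.nodup_ofList _)
  rw [show PySem.Set.ofList (PySem.Set.diff (PySem.Set.ofList (pvGridCells grid_size))
      (compute_coverage observers grid_size radius)) = PySem.Set.diff
      (PySem.Set.ofList (pvGridCells grid_size)) (compute_coverage observers grid_size radius) from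
    PySem.Set.ofList_eq_self_of_nodup _ hnd]
  exact pv_outer _ hnd _ (fun s hs => hs) PySem.Set.empty _ hnd
    (fun x => by simp [PySem.Set.empty]) []

-- ===== VERDICT (by name: the statement is the Claim_ definition above) =====
theorem find_unobserved_corridors_spec : Claim_equal_find_unobserved_corridors :=
  fun observers grid_size radius _ => pv_main observers grid_size radius
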